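-- pv_equiv track=rewrite | github.com/tkwang0530/LeetCode | 1466.py | minReorder2
-- ===== SOURCE A (Python) =====
-- from collections import defaultdict, deque
-- from typing import List
--
-- def minReorder2(n: int, connections: List[List[int]]) -> int:
--     edges = { (source, target) for source, target in connections}
--     graph = defaultdict(list)
--     for source, target in connections:
--         graph[source].append(target)
--         graph[target].append(source)
--
--     queue = deque([0])
--     visited = set([0])
--     changes = 0
--     while len(queue) > 0:
--         city = queue.popleft()
--         for neighbor in graph[city]:
--             if neighbor in visited:
--                 continue
--             if (neighbor, city) not in edges:
--                 changes += 1
--             visited.add(neighbor)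
--             queue.append(neighbor)
--     return changes
-- ===== SOURCE B (Python) =====
-- def minReorder2(n, connections):
--     def neighbors(c):
--         out = []
--         for s, t in connections:
--             if s == c:
--                 out.append(t)
--             if t == c:
--                 out.append(s)
--         return out
--
--     def walk(frontier, seen):
--         nxt = []
--         cnt = 0
--         for c in frontier:
--             for nb in neighbors(c):
--                 if nb not in seen:
--                     seen.add(nb)
--                     nxt.append(nb)
--                     if [nb, c] not in connections:
--                         cnt += 1
--         if not nxt:
--             return cnt
--         return cnt + walk(nxt, seen)
--
--     return walk([0], {0})
-- ===== Notes on version B (the rewrite author's own statement) =====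
-- stated objective: alternative
-- what changed: A's deque-based while loop over a prebuilt defaultdict adjacency map and a set of directed edge tuples is replaced by a recursive level-by-level walk that rescans the connections list for each city's neighbors, tests edge direction by list membership, and sums per-level counts through the recursion; no deque, dict or tuple set is built.
import Mathlib
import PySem

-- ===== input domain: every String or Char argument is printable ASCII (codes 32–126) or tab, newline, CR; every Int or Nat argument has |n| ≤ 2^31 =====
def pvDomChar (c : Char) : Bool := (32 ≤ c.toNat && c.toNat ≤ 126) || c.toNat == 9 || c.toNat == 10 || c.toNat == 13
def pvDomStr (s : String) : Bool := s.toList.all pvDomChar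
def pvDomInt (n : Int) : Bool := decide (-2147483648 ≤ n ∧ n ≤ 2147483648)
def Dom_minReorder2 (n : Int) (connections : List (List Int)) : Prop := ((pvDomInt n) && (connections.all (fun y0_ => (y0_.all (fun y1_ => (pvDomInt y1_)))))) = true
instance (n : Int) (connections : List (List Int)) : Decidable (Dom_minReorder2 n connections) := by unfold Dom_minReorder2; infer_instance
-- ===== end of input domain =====

-- B replaces A's deque-BFS over a prebuilt adjacency dict and directed-edge set by a recursive
-- level-by-level walk that rescans `connections` for each city's neighbors, tests edge direction
-- by list membership, and sums per-level counts through the recursion (objective: alternative).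

-- ===== PORT A =====
-- 'source, target = connection' (Pre_ guarantees length 2, so the defaults are never consulted)
def pvUnpack2 (e : List Int) : Int × Int := (e.getD 0 0, e.getD 1 0)

-- A: edges = {(source, target) for source, target in connections}
def pvEdges (conns : List (List Int)) : PySem.Set (Int × Int) :=
  PySem.Set.ofList (conns.map pvUnpack2)

-- A: graph = defaultdict(list); for source, target in connections:
--      graph[source].append(target); graph[target].append(source)
def pvGraph (conns : List (List Int)) : PySem.Dict Int (List Int) :=
  conns.foldl (fun g e =>
    let s := (pvUnpack2 e).1
    let t := (pvUnpack2 e).2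
    let g1 := g.insert s (g.getD s [] ++ [t])
    g1.insert t (g1.getD t [] ++ [s])) PySem.Dict.empty

-- state of A's inner 'for neighbor in graph[city]' loop: (visited, changes, queue being appended to)
abbrev PvSt := PySem.Set Int × Int × List Int

-- A's inner loop body: skip visited; count wrong direction via the edge set; enqueue
def pvStepA (edges : PySem.Set (Int × Int)) (city : Int) (st : PvSt) (nb : Int) : PvSt :=
  if PySem.Set.contains st.1 nb then st
  else (PySem.Set.add st.1 nb,
        (if PySem.Set.contains edges (nb, city) then st.2.1 else st.2.1 + 1),
        st.2.2 ++ [nb])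

-- ---- termination infrastructure for A's while loop (cited by decreasing_by) ----
-- every int that can ever be visited
def pvCand (conns : List (List Int)) : List Int := 0 :: conns.flatMap id
-- measure: how many candidate occurrences are still unvisited
def pvMu (conns : List (List Int)) (v : PySem.Set Int) : Nat :=
  (pvCand conns).countP (fun x => !(PySem.Set.contains v x))

lemma pv_countP_le {α : Type} (S : List α) (p q : α → Bool)
    (hmono : ∀ a, q a = true → p a = true) : S.countP q ≤ S.countP p :=
  List.countP_mono_left (fun a _ => hmono a)

lemma pv_mu_mono (conns : List (List Int)) (v w : PySem.Set Int)
    (h : ∀ a, PySem.Set.contains v a = true → PySem.Set.contains w a = true) :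
    pvMu conns w ≤ pvMu conns v := by
  apply pv_countP_le
  intro a ha
  cases hv : PySem.Set.contains v a with
  | false => rfl
  | true => rw [h a hv] at ha; simp at ha

lemma pv_countP_lt {α : Type} (S : List α) (p q : α → Bool)
    (hmono : ∀ a, q a = true → p a = true) (b : α) (hb : b ∈ S)
    (hp : p b = true) (hq : q b = false) : S.countP q < S.countP p := by
  induction S with
  | nil => cases hb
  | cons a S ih =>
      rcases List.mem_cons.mp hb with rfl | hb
      · have := pv_countP_le S p q hmono
        simp [hp, hq]
        omega
      · have h1 := ih hb
        have h2 : (if q a then 1 else 0) ≤ (if p a then 1 else 0) := by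
          cases hqa : q a <;> cases hpa : p a <;> simp_all [hmono a]
        simp only [List.countP_cons]
        omega

lemma pv_contains_add_of_contains (v : PySem.Set Int) (nb a : Int)
    (h : PySem.Set.contains v a = true) :
    PySem.Set.contains (PySem.Set.add v nb) a = true := by
  rw [PySem.Set.contains_iff] at h ⊢
  exact (PySem.Set.mem_add v nb a).mpr (Or.inl h)

lemma pv_mu_add_lt (conns : List (List Int)) (v : PySem.Set Int) (nb : Int)
    (hnb : nb ∈ pvCand conns) (hv : PySem.Set.contains v nb = false) :
    pvMu conns (PySem.Set.add v nb) < pvMu conns v := by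
  refine pv_countP_lt _ _ _ ?_ nb hnb ?_ ?_
  · intro a ha
    cases hva : PySem.Set.contains v a with
    | false => rfl
    | true => rw [pv_contains_add_of_contains v nb a hva] at ha; simp at ha
  · simp only [Bool.not_eq_eq_eq_not, Bool.not_true]
    exact hv
  · have : PySem.Set.contains (PySem.Set.add v nb) nb = true := by
      rw [PySem.Set.contains_iff]
      exact (PySem.Set.mem_add v nb nb).mpr (Or.inr rfl)
    simp only [this, Bool.not_true]

-- one pass of A's inner loop: visited only grows, and every enqueued element pays one mu unit
lemma pv_foldA_mu (edges : PySem.Set (Int × Int)) (city : Int) (conns : List (List Int)) :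
    ∀ (nbs : List Int) (v : PySem.Set Int) (c : Int) (X : List Int),
      (∀ nb ∈ nbs, nb ∈ pvCand conns) →
      (∀ a, PySem.Set.contains v a = true →
        PySem.Set.contains (nbs.foldl (pvStepA edges city) (v, c, X)).1 a = true) ∧
      pvMu conns (nbs.foldl (pvStepA edges city) (v, c, X)).1 +
          (nbs.foldl (pvStepA edges city) (v, c, X)).2.2.length ≤
        pvMu conns v + X.length := by
  intro nbs
  induction nbs with
  | nil => intro v c X _; exact ⟨fun a ha => ha, le_rfl⟩
  | cons nb nbs ih =>
      intro v c X hsub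
      simp only [List.foldl_cons, pvStepA]
      by_cases hv : PySem.Set.contains v nb = true
      · simp only [hv, if_true]
        exact ih v c X (fun b hb => hsub b (List.mem_cons_of_mem _ hb))
      · have hvf : PySem.Set.contains v nb = false := by simpa using hv
        simp only [hvf, Bool.false_eq_true, if_false]
        obtain ⟨ihm, ihl⟩ := ih (PySem.Set.add v nb)
          (if PySem.Set.contains edges (nb, city) then c else c + 1) (X ++ [nb])
          (fun b hb => hsub b (List.mem_cons_of_mem _ hb))
        refine ⟨fun a ha => ihm a (pv_contains_add_of_contains v nb a ha), ?_⟩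
        have hlt := pv_mu_add_lt conns v nb (hsub nb List.mem_cons_self) hvf
        simp only [List.length_append, List.length_cons, List.length_nil] at ihl ⊢
        omega

lemma pv_unpack_mem (conns : List (List Int)) (e : List Int) (he : e ∈ conns) :
    (pvUnpack2 e).1 ∈ pvCand conns ∧ (pvUnpack2 e).2 ∈ pvCand conns := by
  have hmem : ∀ x ∈ e, x ∈ pvCand conns := by
    intro x hx
    exact List.mem_cons_of_mem _ (List.mem_flatMap.mpr ⟨e, he, hx⟩)
  have h0 : (0 : Int) ∈ pvCand conns := List.mem_cons_self
  cases e with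
  | nil => exact ⟨h0, h0⟩
  | cons a es =>
      refine ⟨hmem a (by simp), ?_⟩
      cases es with
      | nil => simpa [pvUnpack2] using h0
      | cons b es' => exact hmem ((pvUnpack2 (a :: b :: es')).2) (by simp [pvUnpack2])

-- every value stored in the adjacency dict is a candidate
lemma pv_graph_sub (conns : List (List Int)) :
    ∀ (l : List (List Int)) (g : PySem.Dict Int (List Int)),
      (∀ e ∈ l, e ∈ conns) →
      (∀ c x, x ∈ g.getD c [] → x ∈ pvCand conns) →
      ∀ c x, x ∈ (l.foldl (fun g e =>
        let s := (pvUnpack2 e).1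
        let t := (pvUnpack2 e).2
        let g1 := g.insert s (g.getD s [] ++ [t])
        g1.insert t (g1.getD t [] ++ [s])) g).getD c [] → x ∈ pvCand conns := by
  intro l
  induction l with
  | nil => intro g _ hg c x hx; exact hg c x hx
  | cons e l ih =>
      intro g hl hg c x hx
      have he : e ∈ conns := hl e (by simp)
      refine ih _ (fun e' he' => hl e' (List.mem_cons_of_mem _ he')) ?_ c x hx
      intro c' y hy
      simp only [PySem.Dict.getD_insert] at hy
      split at hy
      · rcases List.mem_append.mp hy with h | h
        · split at h
          · rcases List.mem_append.mp h with h' | h'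
            · exact hg _ y h'
            · simp only [List.mem_singleton] at h'
              exact h' ▸ (pv_unpack_mem conns e he).2
          · exact hg _ y h
        · simp only [List.mem_singleton] at h
          exact h ▸ (pv_unpack_mem conns e he).1
      · split at hy
        · rcases List.mem_append.mp hy with h | h
          · exact hg _ y h
          · simp only [List.mem_singleton] at h
            exact h ▸ (pv_unpack_mem conns e he).2
        · exact hg _ y hy

-- A's while loop: pop the queue's head, run the inner for-loop (appending fresh cities)
def pvLoopA (conns : List (List Int)) (queue : List Int) (v : PySem.Set Int) (c : Int) : Int :=
  match queue with
  | [] => c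
  | city :: rest =>
      let r := ((pvGraph conns).getD city []).foldl (pvStepA (pvEdges conns) city) (v, c, rest)
      pvLoopA conns r.2.2 r.1 r.2.1
termination_by 2 * pvMu conns v + queue.length
decreasing_by
  have hsub : ∀ x ∈ (pvGraph conns).getD city [], x ∈ pvCand conns := by
    intro x hx
    exact pv_graph_sub conns conns PySem.Dict.empty (fun e he => he)
      (by intro c' y hy; rw [PySem.Dict.getD_empty] at hy; cases hy) city x hx
  have h := pv_foldA_mu (pvEdges conns) city conns ((pvGraph conns).getD city []) v c rest hsub
  have hm := pv_mu_mono conns v _ h.1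
  simp only [List.length_cons]
  omega

def minReorder2 (n : Int) (connections : List (List Int)) : Int :=
  pvLoopA connections [0] (PySem.Set.ofList [0]) 0

-- ===== PORT B =====
-- 'for s, t in connections' unpacking (same defaults as A's; irrelevant under Pre_)
def bPair (e : List Int) : Int × Int :=
  match e with
  | s :: t :: _ => (s, t)
  | [s] => (s, 0)
  | [] => (0, 0)

-- B's neighbors(c): rescan connections, head-first recursion
def bNbrs (conns : List (List Int)) (c : Int) : List Int :=
  match conns with
  | [] => []
  | e :: rest =>
      (if (bPair e).1 = c then [(bPair e).2] else []) ++
      (if (bPair e).2 = c then [(bPair e).1] else []) ++ bNbrs rest c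

-- B's inner 'for nb in neighbors(c)' loop: returns (seen, fresh cities, this city's count)
def bScan (conns : List (List Int)) (c : Int) (nbs : List Int) (seen : PySem.Set Int) :
    PySem.Set Int × List Int × Int :=
  match nbs with
  | [] => (seen, [], 0)
  | nb :: rest =>
      if PySem.Set.contains seen nb then bScan conns c rest seen
      else
        let r := bScan conns c rest (PySem.Set.add seen nb)
        (r.1, nb :: r.2.1, (if conns.contains [nb, c] then 0 else 1) + r.2.2)

-- B's 'for c in frontier' loop: returns (seen, next frontier, this level's count)
def bLevel (conns : List (List Int)) (frontier : List Int) (seen : PySem.Set Int) :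
    PySem.Set Int × List Int × Int :=
  match frontier with
  | [] => (seen, [], 0)
  | c :: fs =>
      let r := bScan conns c (bNbrs conns c) seen
      let q := bLevel conns fs r.1
      (q.1, r.2.1 ++ q.2.1, r.2.2 + q.2.2)

-- B's walk(frontier, seen): one level, then recurse; the fuel is a totality guard only
-- (2*len(connections)+1 is proved sufficient below — Python B needs none)
def bWalk (conns : List (List Int)) (fuel : Nat) (frontier : List Int) (seen : PySem.Set Int) : Int :=
  match fuel with
  | 0 => 0
  | fuel + 1 =>
      let r := bLevel conns frontier seen
      if r.2.1.isEmpty then r.2.2 else r.2.2 + bWalk conns fuel r.2.1 r.1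

def minReorder2_alt (n : Int) (connections : List (List Int)) : Int :=
  bWalk connections (2 * connections.length + 1) [0] (PySem.Set.ofList [0])

-- ===== PRECONDITION & SPEC =====
-- Pre_ excludes exactly the inputs where A raises: a connection that is not a 2-element list
-- makes 'for source, target in connections' raise ValueError.
def Pre_minReorder2 (n : Int) (connections : List (List Int)) : Prop :=
  ∀ e ∈ connections, e.length = 2
instance (n : Int) (connections : List (List Int)) : Decidable (Pre_minReorder2 n connections) := by
  unfold Pre_minReorder2; infer_instance

def pvWitness_minReorder2 : Int × List (List Int) := (6, [[0, 1], [1, 3], [2, 3], [4, 0], [4, 5]])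

def Spec_minReorder2 (n : Int) (connections : List (List Int)) (out : Int) : Prop := out = minReorder2_alt n connections
instance (n : Int) (connections : List (List Int)) (out : Int) : Decidable (Spec_minReorder2 n connections out) := by unfold Spec_minReorder2; infer_instance

-- ===== CLAIM (what is proved, stated in full; the proofs are below) =====
def Claim_equal_minReorder2 : Prop := ∀ (n : Int) (connections : List (List Int)), Dom_minReorder2 n connections → Pre_minReorder2 n connections → Spec_minReorder2 n connections (minReorder2 n connections)

-- ===== LEMMAS AND PROOFS =====

lemma pv_bPair_eq (e : List Int) : bPair e = pvUnpack2 e := by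
  match e with
  | [] => rfl
  | [s] => rfl
  | s :: t :: _ => rfl

-- A's adjacency lists coincide with B's rescans
lemma pv_two_insert_getD (g : PySem.Dict Int (List Int)) (s t c : Int) :
    ((g.insert s (g.getD s [] ++ [t])).insert t
        ((g.insert s (g.getD s [] ++ [t])).getD t [] ++ [s])).getD c [] =
      g.getD c [] ++ ((if s = c then [t] else []) ++ (if t = c then [s] else [])) := by
  simp only [PySem.Dict.getD_insert]
  by_cases h1 : c = t <;> by_cases h2 : c = s <;> by_cases h3 : t = s <;>
    simp_all [eq_comm]

lemma pv_graph_getD_aux (conns : List (List Int)) (c : Int) :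
    ∀ (l : List (List Int)) (g : PySem.Dict Int (List Int)),
      (l.foldl (fun g e =>
        let s := (pvUnpack2 e).1
        let t := (pvUnpack2 e).2
        let g1 := g.insert s (g.getD s [] ++ [t])
        g1.insert t (g1.getD t [] ++ [s])) g).getD c [] =
      g.getD c [] ++ bNbrs l c := by
  intro l
  induction l with
  | nil => intro g; simp [bNbrs]
  | cons e l ih =>
      intro g
      simp only [List.foldl_cons]
      rw [ih, bNbrs]
      rw [pv_two_insert_getD g (pvUnpack2 e).1 (pvUnpack2 e).2 c]
      simp [pv_bPair_eq, List.append_assoc]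

lemma pv_graph_getD (conns : List (List Int)) (c : Int) :
    (pvGraph conns).getD c [] = bNbrs conns c := by
  have := pv_graph_getD_aux conns c conns PySem.Dict.empty
  simpa [pvGraph, PySem.Dict.getD_empty] using this

-- the direction tests agree under Pre_
lemma pv_len2_eq (e : List Int) (h : e.length = 2) : e = [e.getD 0 0, e.getD 1 0] := by
  match e, h with
  | [a, b], _ => rfl

lemma pv_mem_edges (conns : List (List Int)) (hpre : ∀ e ∈ conns, e.length = 2)
    (a b : Int) :
    PySem.Set.contains (pvEdges conns) (a, b) = conns.contains [a, b] := by
  rw [Bool.eq_iff_iff]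
  rw [PySem.Set.contains_iff]
  unfold pvEdges
  rw [PySem.Set.mem_ofList, List.mem_map, List.contains_iff_mem]
  constructor
  · rintro ⟨e, he, hu⟩
    have h2 := pv_len2_eq e (hpre e he)
    have ha : e.getD 0 0 = a := congrArg Prod.fst hu
    have hb : e.getD 1 0 = b := congrArg Prod.snd hu
    rw [ha, hb] at h2
    exact h2 ▸ he
  · intro h
    exact ⟨[a, b], h, rfl⟩

-- A's inner for-loop computes exactly B's scan result
lemma pv_scan_spec (conns : List (List Int)) (hpre : ∀ e ∈ conns, e.length = 2) (city : Int) :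
    ∀ (nbs : List Int) (v : PySem.Set Int) (c0 : Int) (X : List Int),
      nbs.foldl (pvStepA (pvEdges conns) city) (v, c0, X) =
        ((bScan conns city nbs v).1, c0 + (bScan conns city nbs v).2.2,
          X ++ (bScan conns city nbs v).2.1) := by
  intro nbs
  induction nbs with
  | nil => intro v c0 X; simp [bScan]
  | cons nb rest ih =>
      intro v c0 X
      simp only [List.foldl_cons, pvStepA, bScan]
      by_cases hv : PySem.Set.contains v nb = true
      · simp only [hv, if_true]
        exact ih v c0 X
      · have hvf : PySem.Set.contains v nb = false := by simpa using hv
        simp only [hvf, Bool.false_eq_true, if_false]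
        rw [ih (PySem.Set.add v nb) _ (X ++ [nb])]
        rw [pv_mem_edges conns hpre nb city]
        cases hm : conns.contains [nb, city] <;>
          simp only [Bool.false_eq_true, if_true, if_false] <;>
          simp [List.append_assoc, Int.add_assoc]

-- A's per-city processing as a fold step over cities (proof-only helper)
def pvCityA (conns : List (List Int)) (st : PvSt) (city : Int) : PvSt :=
  ((pvGraph conns).getD city []).foldl (pvStepA (pvEdges conns) city) st

lemma pvLoopA_nil (conns : List (List Int)) (v : PySem.Set Int) (c : Int) :
    pvLoopA conns [] v c = c := by
  rw [pvLoopA]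

lemma pvLoopA_cons (conns : List (List Int)) (city : Int) (rest : List Int)
    (v : PySem.Set Int) (c : Int) :
    pvLoopA conns (city :: rest) v c =
      pvLoopA conns (pvCityA conns (v, c, rest) city).2.2
        (pvCityA conns (v, c, rest) city).1 (pvCityA conns (v, c, rest) city).2.1 := by
  rw [pvLoopA]
  rfl

-- processing a whole BFS level: A's queue interleaving equals B's level recursion
lemma pv_loopA_level (conns : List (List Int)) (hpre : ∀ e ∈ conns, e.length = 2) :
    ∀ (F N : List Int) (v : PySem.Set Int) (c0 : Int),
      pvLoopA conns (F ++ N) v c0 =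
        pvLoopA conns (N ++ (bLevel conns F v).2.1) (bLevel conns F v).1
          (c0 + (bLevel conns F v).2.2) := by
  intro F
  induction F with
  | nil => intro N v c0; simp [bLevel]
  | cons c fs ih =>
      intro N v c0
      rw [List.cons_append, pvLoopA_cons]
      have hc : pvCityA conns (v, c0, fs ++ N) c =
          ((bScan conns c (bNbrs conns c) v).1,
            c0 + (bScan conns c (bNbrs conns c) v).2.2,
            (fs ++ N) ++ (bScan conns c (bNbrs conns c) v).2.1) := by
        unfold pvCityA
        rw [pv_graph_getD]
        exact pv_scan_spec conns hpre c (bNbrs conns c) v c0 (fs ++ N)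
      rw [hc]
      simp only [List.append_assoc]
      rw [ih (N ++ (bScan conns c (bNbrs conns c) v).2.1)
            (bScan conns c (bNbrs conns c) v).1
            (c0 + (bScan conns c (bNbrs conns c) v).2.2)]
      simp only [bLevel, List.append_assoc]
      ring_nf

-- measure bookkeeping for B's level, to know the fuel suffices
lemma pv_scan_mu (conns : List (List Int)) (c : Int) :
    ∀ (nbs : List Int) (v : PySem.Set Int),
      (∀ nb ∈ nbs, nb ∈ pvCand conns) →
      (∀ a, PySem.Set.contains v a = true →
        PySem.Set.contains (bScan conns c nbs v).1 a = true) ∧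
      pvMu conns (bScan conns c nbs v).1 + (bScan conns c nbs v).2.1.length ≤ pvMu conns v := by
  intro nbs
  induction nbs with
  | nil => intro v _; exact ⟨fun a ha => ha, by simp [bScan]⟩
  | cons nb rest ih =>
      intro v hsub
      simp only [bScan]
      by_cases hv : PySem.Set.contains v nb = true
      · simp only [hv, if_true]
        exact ih v (fun b hb => hsub b (List.mem_cons_of_mem _ hb))
      · have hvf : PySem.Set.contains v nb = false := by simpa using hv
        simp only [hvf, Bool.false_eq_true, if_false]
        obtain ⟨ihm, ihl⟩ := ih (PySem.Set.add v nb)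
          (fun b hb => hsub b (List.mem_cons_of_mem _ hb))
        refine ⟨fun a ha => ihm a (pv_contains_add_of_contains v nb a ha), ?_⟩
        have hlt := pv_mu_add_lt conns v nb (hsub nb List.mem_cons_self) hvf
        simp only [List.length_cons]
        omega

lemma pv_bNbrs_sub (conns : List (List Int)) (c : Int) :
    ∀ (l : List (List Int)), (∀ e ∈ l, e ∈ conns) → ∀ x ∈ bNbrs l c, x ∈ pvCand conns := by
  intro l
  induction l with
  | nil => intro _ x hx; simp [bNbrs] at hx
  | cons e rest ih =>
      intro hl x hx
      have he : e ∈ conns := hl e (by simp)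
      simp only [bNbrs, List.mem_append] at hx
      rcases hx with (h | h) | h
      · split at h
        · simp only [List.mem_singleton] at h
          rw [pv_bPair_eq] at h
          exact h ▸ (pv_unpack_mem conns e he).2
        · simp at h
      · split at h
        · simp only [List.mem_singleton] at h
          rw [pv_bPair_eq] at h
          exact h ▸ (pv_unpack_mem conns e he).1
        · simp at h
      · exact ih (fun e' he' => hl e' (List.mem_cons_of_mem _ he')) x h

lemma pv_level_mu (conns : List (List Int)) :
    ∀ (F : List Int) (v : PySem.Set Int),
      (∀ a, PySem.Set.contains v a = true →
        PySem.Set.contains (bLevel conns F v).1 a = true) ∧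
      pvMu conns (bLevel conns F v).1 + (bLevel conns F v).2.1.length ≤ pvMu conns v := by
  intro F
  induction F with
  | nil => intro v; exact ⟨fun a ha => ha, by simp [bLevel]⟩
  | cons c fs ih =>
      intro v
      simp only [bLevel]
      obtain ⟨hm1, hl1⟩ := pv_scan_mu conns c (bNbrs conns c) v
        (pv_bNbrs_sub conns c conns (fun e he => he))
      obtain ⟨hm2, hl2⟩ := ih (bScan conns c (bNbrs conns c) v).1
      refine ⟨fun a ha => hm2 a (hm1 a ha), ?_⟩
      simp only [List.length_append]
      omega

-- A's whole while loop equals B's recursive walk, for any sufficient fuel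
lemma pv_loop_eq_walk (conns : List (List Int)) (hpre : ∀ e ∈ conns, e.length = 2) :
    ∀ (fuel : Nat) (F : List Int) (v : PySem.Set Int) (c0 : Int),
      pvMu conns v < fuel → pvLoopA conns F v c0 = c0 + bWalk conns fuel F v := by
  intro fuel
  induction fuel with
  | zero => intro F v c0 h; omega
  | succ fuel ih =>
      intro F v c0 hfuel
      have hL := pv_loopA_level conns hpre F [] v c0
      rw [List.append_nil, List.nil_append] at hL
      simp only [bWalk]
      by_cases hn : (bLevel conns F v).2.1.isEmpty
      · rw [if_pos hn, hL]
        have : (bLevel conns F v).2.1 = [] := List.isEmpty_iff.mp hn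
        rw [this, pvLoopA_nil]
      · rw [if_neg hn, hL]
        have hmu := (pv_level_mu conns F v).2
        have hlen : (bLevel conns F v).2.1.length ≠ 0 := by
          intro h0
          exact hn (by simpa [List.isEmpty_iff, List.length_eq_zero_iff] using h0)
        rw [ih (bLevel conns F v).2.1 (bLevel conns F v).1 (c0 + (bLevel conns F v).2.2)
              (by omega)]
        ring

-- the chosen fuel is sufficient under Pre_
lemma pv_flatMap_len (conns : List (List Int)) (hpre : ∀ e ∈ conns, e.length = 2) :
    (conns.flatMap id).length = 2 * conns.length := by
  induction conns with
  | nil => simp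
  | cons e rest ih =>
      simp only [List.flatMap_cons, List.length_append, List.length_cons, id]
      rw [ih (fun e' he' => hpre e' (List.mem_cons_of_mem _ he'))]
      have := hpre e (by simp)
      omega

lemma pv_mu_start (conns : List (List Int)) (hpre : ∀ e ∈ conns, e.length = 2) :
    pvMu conns (PySem.Set.ofList [0]) < 2 * conns.length + 1 := by
  unfold pvMu pvCand
  rw [List.countP_cons]
  have h0 : (!(PySem.Set.contains (PySem.Set.ofList [0]) (0 : Int))) = false := by decide
  simp only [h0, Bool.false_eq_true, if_false]
  have := List.countP_le_length
    (l := conns.flatMap id) (p := fun x => !(PySem.Set.contains (PySem.Set.ofList [0]) x))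
  rw [pv_flatMap_len conns hpre] at this
  omega

-- ===== VERDICT (by name: the statement is the Claim_ definition above) =====
theorem minReorder2_spec : Claim_equal_minReorder2 := by
  intro n conns _ hpre
  unfold Spec_minReorder2 minReorder2 minReorder2_alt
  rw [pv_loop_eq_walk conns hpre (2 * conns.length + 1) [0] (PySem.Set.ofList [0]) 0
        (pv_mu_start conns hpre)]
  ring
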